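-- pv_equiv track=rewrite | github.com/alexguimaraes/Speed2048MDP | j2048_motor_42346.py | somar_esquerda
-- ===== SOURCE A (Python) =====
-- def somar_esquerda(uma_lista):
--     resultado = []
--     lenlista = len(uma_lista)
--     pontos = 0
--     indice = 0
--     while indice < lenlista - 1:
--         valor = uma_lista[indice]
--         if valor == uma_lista[indice + 1]:
--             soma = valor + valor
--             resultado.append(soma)
--             pontos = pontos + soma
--             indice = indice + 2
--         else:
--             resultado.append(valor)
--             indice = indice + 1
--     if indice == lenlista - 1:
--         resultado.append(uma_lista[indice])
--     while len(resultado) < lenlista: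
--         resultado.append(0)
--     return resultado, pontos
-- ===== SOURCE B (Python) =====
-- from itertools import groupby
--
-- def somar_esquerda(uma_lista):
--     resultado = []
--     pontos = 0
--     for v, run in groupby(uma_lista):
--         L = sum(1 for _ in run)
--         resultado.extend([v + v] * (L // 2))
--         resultado.extend([v] * (L % 2))
--         pontos += (L // 2) * (v + v)
--     resultado.extend([0] * (len(uma_lista) - len(resultado)))
--     return resultado, pontos
-- ===== Notes on version B (the rewrite author's own statement) =====
-- stated objective: idiomatic
-- what changed: Replaced the index-stepping pair-merge while-loop with an itertools.groupby run-length decomposition: each maximal run of value v and length L contributes L//2 copies of v+v plus L%2 copies of v and (L//2)*(v+v) points, then the result is padded with zeros in one extend.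
import Mathlib
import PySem

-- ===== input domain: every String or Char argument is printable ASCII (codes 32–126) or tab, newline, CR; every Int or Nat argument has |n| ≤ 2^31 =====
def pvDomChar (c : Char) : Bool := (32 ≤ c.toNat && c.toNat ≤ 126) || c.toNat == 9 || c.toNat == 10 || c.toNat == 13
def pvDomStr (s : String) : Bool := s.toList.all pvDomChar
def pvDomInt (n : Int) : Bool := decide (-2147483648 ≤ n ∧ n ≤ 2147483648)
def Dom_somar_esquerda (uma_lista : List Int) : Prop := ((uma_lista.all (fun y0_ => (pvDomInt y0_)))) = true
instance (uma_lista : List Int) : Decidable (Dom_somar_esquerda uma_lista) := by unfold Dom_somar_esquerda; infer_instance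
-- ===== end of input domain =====

-- B replaces A's index-stepping pair-merge loop by a run-length decomposition with
-- per-run closed-form arithmetic (objective: idiomatic/alternative, same cost).

-- ===== PORT A =====
-- the while loop of A: state (resultado, pontos, indice); returns the state at loop exit.
-- The guard `indice + 1 < length` makes both Python index accesses in range, so `l[indice]`
-- is exact here.
def somarEsquerdaLoop (l : List Int) (indice : Nat) (resultado : List Int) (pontos : Int) :
    List Int × Int × Nat :=
  if h : indice + 1 < l.length then
    let valor := l[indice]'(by omega)
    if valor = l[indice + 1] then
      somarEsquerdaLoop l (indice + 2) (resultado ++ [valor + valor]) (pontos + (valor + valor))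
    else
      somarEsquerdaLoop l (indice + 1) (resultado ++ [valor]) pontos
  else (resultado, pontos, indice)
termination_by l.length - indice

-- the trailing `while len(resultado) < lenlista: resultado.append(0)` loop of A
def somarEsquerdaPad (resultado : List Int) (lenlista : Nat) : List Int :=
  if resultado.length < lenlista then somarEsquerdaPad (resultado ++ [0]) lenlista
  else resultado
termination_by lenlista - resultado.length

def somar_esquerda (uma_lista : List Int) : List Int × Int :=
  let s := somarEsquerdaLoop uma_lista 0 [] 0
  -- `if indice == lenlista - 1: resultado.append(uma_lista[indice])`; the index is then in
  -- range, so `getD` is exact.  Nat form `indice + 1 = length` matches Python's Int test.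
  let resultado := if s.2.2 + 1 = uma_lista.length then s.1 ++ [uma_lista.getD s.2.2 0] else s.1
  (somarEsquerdaPad resultado uma_lista.length, s.2.1)

-- ===== PORT B =====
-- itertools.groupby: the list as maximal runs (value, length)
def somarRuns (l : List Int) : List (Int × Nat) :=
  match l with
  | [] => []
  | v :: t =>
      (v, 1 + (t.takeWhile (· = v)).length) :: somarRuns (t.dropWhile (· = v))
termination_by l.length
decreasing_by simpa using Nat.lt_succ_of_le (List.length_dropWhile_le _ t)

def somarEmit (r : Int × Nat) : List Int :=
  List.replicate (r.2 / 2) (r.1 + r.1) ++ List.replicate (r.2 % 2) r.1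

def somar_esquerda_alt (uma_lista : List Int) : List Int × Int :=
  let rs := somarRuns uma_lista
  let resultado := rs.flatMap somarEmit
  let pontos := rs.foldl (fun acc r => acc + ((r.2 / 2 : Nat) : Int) * (r.1 + r.1)) 0
  (resultado ++ List.replicate (uma_lista.length - resultado.length) 0, pontos)

-- ===== PRECONDITION & SPEC =====
def Spec_somar_esquerda (uma_lista : List Int) (out : List Int × Int) : Prop := out = somar_esquerda_alt uma_lista
instance (uma_lista : List Int) (out : List Int × Int) : Decidable (Spec_somar_esquerda uma_lista out) := by unfold Spec_somar_esquerda; infer_instance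

-- ===== CLAIM (what is proved, stated in full; the proofs are below) =====
def Claim_equal_somar_esquerda : Prop := ∀ (uma_lista : List Int), Dom_somar_esquerda uma_lista → Spec_somar_esquerda uma_lista (somar_esquerda uma_lista)

-- ===== LEMMAS AND PROOFS =====

-- reference pair-merge: (merged output, points, leftover odd element at the end)
def mpRef : List Int → List Int × Int × List Int
  | [] => ([], 0, [])
  | [a] => ([], 0, [a])
  | a :: b :: t =>
      if a = b then
        let m := mpRef t
        ((a + a) :: m.1, (a + a) + m.2.1, m.2.2)
      else
        let m := mpRef (b :: t)
        (a :: m.1, m.2.1, m.2.2)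

theorem mpRef_eq_eq (a : Int) (t : List Int) :
    mpRef (a :: a :: t) = ((a + a) :: (mpRef t).1, (a + a) + (mpRef t).2.1, (mpRef t).2.2) := by
  simp [mpRef]

theorem mpRef_eq_ne (a b : Int) (t : List Int) (h : ¬ a = b) :
    mpRef (a :: b :: t) =
      (a :: (mpRef (b :: t)).1, (mpRef (b :: t)).2.1, (mpRef (b :: t)).2.2) := by
  simp [mpRef, h]

theorem mpRef_leftover_aux (n : Nat) : ∀ (l : List Int), l.length ≤ n →
    (mpRef l).2.2 = [] ∨ (l ≠ [] ∧ (mpRef l).2.2 = [l.getD (l.length - 1) 0]) := by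
  induction n with
  | zero =>
      intro l h
      have : l = [] := by cases l <;> simp_all
      subst this
      left; rfl
  | succ n ih =>
      intro l h
      match l with
      | [] => left; rfl
      | [a] => right; exact ⟨by simp, by simp [mpRef]⟩
      | a :: b :: t =>
        by_cases hab : a = b
        · subst hab
          rw [mpRef_eq_eq]
          rcases ih t (by simp at h; omega) with h1 | ⟨hne, h1⟩
          · left; exact h1
          · right
            refine ⟨by simp, ?_⟩
            rw [h1]
            rcases t with _ | ⟨c, t'⟩
            · simp at hne
            · simp only [List.getD, List.length_cons]
              rfl
        · rw [mpRef_eq_ne a b t hab]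
          rcases ih (b :: t) (by simp at h ⊢; omega) with h1 | ⟨hne, h1⟩
          · left; exact h1
          · right
            refine ⟨by simp, ?_⟩
            rw [h1]
            simp only [List.getD, List.length_cons]
            rfl

theorem mpRef_leftover (l : List Int) :
    (mpRef l).2.2 = [] ∨ (l ≠ [] ∧ (mpRef l).2.2 = [l.getD (l.length - 1) 0]) :=
  mpRef_leftover_aux l.length l (le_refl _)

theorem loop_eq (n : Nat) : ∀ (l : List Int) (i : Nat) (res : List Int) (pts : Int),
    l.length - i ≤ n → i ≤ l.length →
    somarEsquerdaLoop l i res pts =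
      (res ++ (mpRef (l.drop i)).1, pts + (mpRef (l.drop i)).2.1,
        l.length - (mpRef (l.drop i)).2.2.length) := by
  induction n with
  | zero =>
      intro l i res pts hn hi
      have hi' : i = l.length := by omega
      rw [somarEsquerdaLoop]
      simp [hi', mpRef]
  | succ n ih =>
      intro l i res pts hn hi
      rw [somarEsquerdaLoop]
      by_cases h : i + 1 < l.length
      · have h0 : i < l.length := by omega
        have hd : l.drop i = l[i] :: l[i+1] :: l.drop (i + 2) := by
          rw [← List.getElem_cons_drop h0, ← List.getElem_cons_drop h]
        rw [dif_pos h]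
        by_cases he : l[i]'(by omega) = l[i + 1]
        · rw [if_pos he, ih l (i + 2) _ _ (by omega) (by omega), hd, he, mpRef_eq_eq]
          simp [Int.add_assoc]
        · rw [if_neg he, ih l (i + 1) _ _ (by omega) (by omega), hd, mpRef_eq_ne _ _ _ he]
          have hd1 : l.drop (i + 1) = l[i+1] :: l.drop (i + 2) := (List.getElem_cons_drop h).symm
          rw [← hd1]
          simp
      · rw [dif_neg h]
        rcases Nat.lt_or_ge i l.length with h1 | h1
        · have hd : l.drop i = [l[i]'(h1)] := by
            rw [← List.getElem_cons_drop h1, List.drop_eq_nil_of_le (by omega)]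
          simp [hd, mpRef]
          omega
        · have : l.drop i = [] := List.drop_eq_nil_of_le h1
          simp [this, mpRef]
          omega

theorem pad_eq (n : Nat) : ∀ (res : List Int) (m : Nat), m - res.length ≤ n →
    somarEsquerdaPad res m = res ++ List.replicate (m - res.length) 0 := by
  induction n with
  | zero =>
      intro res m h
      rw [somarEsquerdaPad]
      have h1 : ¬ res.length < m := by omega
      have h2 : m - res.length = 0 := by omega
      simp [h1, h2]
  | succ n ih =>
      intro res m h
      rw [somarEsquerdaPad]
      by_cases hl : res.length < m
      · rw [if_pos hl, ih _ _ (by simp; omega)]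
        have h2 : m - res.length = (m - (res.length + 1)) + 1 := by omega
        simp only [List.length_append, List.length_cons, List.length_nil, h2]
        rw [List.replicate_succ, List.append_assoc]
        rfl
      · rw [if_neg hl]
        have : m - res.length = 0 := by omega
        simp [this]

-- A's full result in terms of the reference merge
theorem somar_esquerda_eq (l : List Int) :
    somar_esquerda l =
      ((mpRef l).1 ++ (mpRef l).2.2 ++
          List.replicate (l.length - ((mpRef l).1 ++ (mpRef l).2.2).length) 0,
        (mpRef l).2.1) := by
  unfold somar_esquerda
  rw [loop_eq (l.length) l 0 [] 0 (by omega) (by omega)]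
  simp only [List.drop_zero, List.nil_append, Int.zero_add]
  rcases mpRef_leftover l with h | ⟨hne, h⟩
  · have hlen0 : (mpRef l).2.2.length = 0 := by simp [h]
    have hcond : ¬ (l.length - (mpRef l).2.2.length + 1 = l.length) := by
      rw [hlen0]; omega
    rw [if_neg hcond, pad_eq (l.length) _ _ (by omega)]
    simp [h]
  · have hlen1 : (mpRef l).2.2.length = 1 := by simp [h]
    have hlpos : 0 < l.length := by cases l <;> simp_all
    have hcond : l.length - (mpRef l).2.2.length + 1 = l.length := by rw [hlen1]; omega
    rw [if_pos hcond, pad_eq (l.length) _ _ (by omega)]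
    have hidx : l.length - (mpRef l).2.2.length = l.length - 1 := by rw [hlen1]
    rw [hidx, h]

-- one run of length L followed by rest whose head differs from v
theorem mpRef_run (L : Nat) : ∀ (v : Int) (rest : List Int), rest.head? ≠ some v →
    (mpRef (List.replicate L v ++ rest)).1 ++ (mpRef (List.replicate L v ++ rest)).2.2 =
        List.replicate (L / 2) (v + v) ++ List.replicate (L % 2) v ++
          ((mpRef rest).1 ++ (mpRef rest).2.2) ∧
    (mpRef (List.replicate L v ++ rest)).2.1 =
        ((L / 2 : Nat) : Int) * (v + v) + (mpRef rest).2.1 := by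
  induction L using Nat.strong_induction_on with
  | _ L ih =>
    intro v rest hhd
    match L with
    | 0 => simp
    | 1 =>
        rcases rest with _ | ⟨b, t⟩
        · simp [mpRef]
        · have hbv : ¬ ((v : Int) = b) := by
            intro h; exact hhd (by simp [h])
          rw [show List.replicate 1 v ++ b :: t = v :: b :: t by simp,
            mpRef_eq_ne v b t hbv]
          simp
    | (n + 2) =>
        have hrep : List.replicate (n + 2) v ++ rest =
            v :: v :: (List.replicate n v ++ rest) := by
          simp [List.replicate_succ]
        obtain ⟨ih1, ih2⟩ := ih n (by omega) v rest hhd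
        rw [hrep, mpRef_eq_eq]
        constructor
        · rw [List.cons_append, ih1]
          have h2 : (n + 2) / 2 = n / 2 + 1 := by omega
          have h3 : (n + 2) % 2 = n % 2 := by omega
          rw [h2, h3, List.replicate_succ]
          simp
        · rw [ih2]
          have h2 : ((n + 2) / 2 : Nat) = (n / 2 : Nat) + 1 := by omega
          rw [h2]
          push_cast
          ring

theorem head?_dropWhile_ne (v : Int) (t : List Int) :
    (t.dropWhile (· = v)).head? ≠ some v := by
  intro h
  have hne : t.dropWhile (· = v) ≠ [] := by
    intro h0; rw [h0] at h; simp at h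
  have := List.head_dropWhile_not (· = v) hne
  rw [List.head?_eq_some_head hne] at h
  simp_all

theorem takeWhile_eq_replicate (v : Int) (t : List Int) :
    t.takeWhile (· = v) = List.replicate (t.takeWhile (· = v)).length v := by
  rw [List.eq_replicate_iff]
  exact ⟨rfl, fun b hb => by simpa using List.mem_takeWhile_imp hb⟩

theorem runs_eq (n : Nat) : ∀ (l : List Int), l.length ≤ n →
    (somarRuns l).flatMap somarEmit = (mpRef l).1 ++ (mpRef l).2.2 ∧
    ((somarRuns l).map (fun r => ((r.2 / 2 : Nat) : Int) * (r.1 + r.1))).sum =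
      (mpRef l).2.1 := by
  induction n with
  | zero =>
      intro l h
      have : l = [] := by cases l <;> simp_all
      subst this
      simp [somarRuns, mpRef]
  | succ n ih =>
      intro l h
      rcases l with _ | ⟨v, t⟩
      · simp [somarRuns, mpRef]
      · rw [somarRuns]
        set k := (t.takeWhile (· = v)).length with hk
        have hsplit : v :: t = List.replicate (1 + k) v ++ t.dropWhile (· = v) := by
          have h1 : (1 + k) = k + 1 := by omega
          rw [h1, List.replicate_succ]
          conv_lhs => rw [← List.takeWhile_append_dropWhile (p := (· = v)) (l := t)]
          rw [takeWhile_eq_replicate v t, ← hk]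
          simp
        have hlen : (t.dropWhile (· = v)).length ≤ n := by
          have := List.length_dropWhile_le (· = v) t
          simp at h; omega
        obtain ⟨ihf, ihp⟩ := ih _ hlen
        obtain ⟨hr1, hr2⟩ := mpRef_run (1 + k) v (t.dropWhile (· = v))
          (head?_dropWhile_ne v t)
        constructor
        · rw [List.flatMap_cons, ihf]
          conv_rhs => rw [hsplit]
          rw [hr1]
          simp [somarEmit]
        · rw [List.map_cons, List.sum_cons, ihp]
          conv_rhs => rw [hsplit]
          rw [hr2]

theorem foldl_pts_eq (rs : List (Int × Nat)) : ∀ (acc : Int),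
    rs.foldl (fun acc r => acc + ((r.2 / 2 : Nat) : Int) * (r.1 + r.1)) acc =
      acc + (rs.map (fun r => ((r.2 / 2 : Nat) : Int) * (r.1 + r.1))).sum := by
  induction rs with
  | nil => simp
  | cons r rs ih =>
      intro acc
      rw [List.foldl_cons, ih, List.map_cons, List.sum_cons]
      ring

-- ===== VERDICT (by name: the statement is the Claim_ definition above) =====
theorem somar_esquerda_spec : Claim_equal_somar_esquerda := by
  intro l _
  unfold Spec_somar_esquerda
  obtain ⟨hf, hp⟩ := runs_eq l.length l (le_refl _)
  rw [somar_esquerda_eq]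
  unfold somar_esquerda_alt
  simp only [foldl_pts_eq, Int.zero_add, hf, hp]
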